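-- pv_equiv track=rewrite | github.com/instill-ai/pipeline-backend | pkg/component/operator/document/v0/pdf_to_markdown/pdf_transformer.py | transform_table_markdown
-- ===== SOURCE A (Python) =====
-- def transform_table_markdown(table: dict):
-- 	result = ""
-- 	texts = table["text"]
-- 	for i, row in enumerate(texts):
-- 		for j, col in enumerate(row):
-- 			if col:
-- 				if "\n" in col:
-- 					col = col.replace("\n", "<br>")
-- 				result += col
--
-- 				if j < len(row) - 1:
-- 					result += " | "
-- 			else:
-- 				if j == 0:
-- 					result += "||"
-- 				else:
-- 					result += "|"
-- 		if i == 0: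
-- 			result += "\n"
-- 			## TODO: Judge table that cross the page,
-- 			result += "|"
-- 			result += " --- |" * len(row)
-- 			result += "\n"
-- 		elif i < len(texts) - 1:
-- 			result += "\n"
--
-- 	return result
-- ===== SOURCE B (Python) =====
-- def _frag(c):
--     return "|" if c == "" else c.replace("\n", "<br>") + " | "
--
--
-- def _row(cells):
--     line = "".join(_frag(c) for c in cells)
--     if cells and cells[0] == "":
--         line = "|" + line
--     if cells and cells[-1] != "":
--         line = line[:-3]
--     return line
--
--
-- def transform_table_markdown(table: dict):
--     texts = table["text"]
--     lines = [_row(r) for r in texts]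
--     if not lines:
--         return ""
--     lines.insert(1, "|" + " --- |" * len(texts[0]))
--     out = "\n".join(lines)
--     return out + "\n" if len(texts) == 1 else out
-- ===== Notes on version B (the rewrite author's own statement) =====
-- stated objective: alternative
-- what changed: A renders cell-by-cell in one accumulator loop whose body branches on the running indices (j==0, j<len(row)-1, i==0, i<len(texts)-1); B is a staged pipeline with no index tests in any loop: map every cell to a fixed index-free fragment, join, then repair the two row edges afterwards (prepend '|' when the first cell is empty, slice off the trailing ' | ' when the last cell is non-empty), insert the separator line into the list of rows and join with newlines.
import Mathlib
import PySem

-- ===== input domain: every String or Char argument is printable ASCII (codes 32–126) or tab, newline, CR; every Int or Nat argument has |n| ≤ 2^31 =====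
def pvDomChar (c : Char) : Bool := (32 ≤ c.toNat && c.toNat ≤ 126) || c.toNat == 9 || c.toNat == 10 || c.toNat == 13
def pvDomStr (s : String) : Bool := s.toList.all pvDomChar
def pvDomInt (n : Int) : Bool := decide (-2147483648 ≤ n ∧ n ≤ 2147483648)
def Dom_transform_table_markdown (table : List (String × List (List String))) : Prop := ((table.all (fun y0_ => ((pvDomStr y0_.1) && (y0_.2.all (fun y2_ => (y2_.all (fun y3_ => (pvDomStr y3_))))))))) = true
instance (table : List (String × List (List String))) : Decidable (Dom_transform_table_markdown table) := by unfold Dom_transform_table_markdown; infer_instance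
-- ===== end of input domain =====

-- B replaces A's single accumulator loop with per-cell i==0 / j<len-1 index branches by a
-- staged pipeline: map each cell to an index-free fragment, join, then fix up the row's two
-- edges (prepend "|" if the first cell is empty, drop the trailing " | " if the last cell is
-- non-empty), insert the separator line and join the lines with "\n".

-- ===== PORT A =====
-- hand port of Python's `s * n` on strings (n-fold concatenation); used by both ports (exact)
def pvStrMul (s : String) : Nat → String
  | 0 => ""
  | n + 1 => s ++ pvStrMul s n

-- the body of A's inner `for j, col in enumerate(row)` loop (rowLen = len(row))
def pvStepCellA (rowLen : Int) (result : String) (jc : Int × String) : String :=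
  if jc.2 ≠ "" then
    let col := if PySem.Str.isIn "\n" jc.2 then PySem.Str.replace jc.2 "\n" "<br>" else jc.2
    let result := result ++ col
    if jc.1 < rowLen - 1 then result ++ " | " else result
  else
    if jc.1 = 0 then result ++ "||" else result ++ "|"

-- the body of A's outer `for i, row in enumerate(texts)` loop (n = len(texts))
def pvStepRowA (n : Nat) (result : String) (ir : Int × List String) : String :=
  let result := (PySem.List.enumerate ir.2).foldl (pvStepCellA (ir.2.length : Int)) result
  if ir.1 = 0 then
    result ++ "\n" ++ "|" ++ pvStrMul " --- |" ir.2.length ++ "\n"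
  else if ir.1 < (n : Int) - 1 then result ++ "\n" else result

def transform_table_markdown (table : List (String × List (List String))) : String :=
  match table.find? (fun p => p.1 == "text") with
  | none => ""   -- table["text"] raises KeyError in Python; excluded by Pre_
  | some p =>
    let texts := p.2
    (PySem.List.enumerate texts).foldl (pvStepRowA texts.length) ""

-- ===== PORT B =====
-- B's `_frag`: one cell's fragment, no index in sight
def pvFragB (c : String) : String :=
  if c = "" then "|" else PySem.Str.replace c "\n" "<br>" ++ " | "

-- B's `_row`: join the fragments, then fix up the two edges of the row
def pvRowB (cells : List String) : String :=
  let line := PySem.Str.join "" (cells.map pvFragB)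
  let line :=
    match PySem.List.pyGet? cells 0 with      -- `if cells and cells[0] == ""`
    | some c => if c = "" then "|" ++ line else line
    | none => line
  match PySem.List.pyGet? cells (-1) with     -- `if cells and cells[-1] != ""`
  | some c => if c ≠ "" then PySem.Str.slice line none (some (-3)) else line
  | none => line

def transform_table_markdown_alt (table : List (String × List (List String))) : String :=
  match table.find? (fun p => p.1 == "text") with
  | none => ""   -- table["text"] raises KeyError in Python; excluded by Pre_
  | some p =>
    match p.2 with
    | [] => ""                                -- `if not lines: return ""`
    | t0 :: rest =>
      let lines := (t0 :: rest).map pvRowB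
      let lines := PySem.List.insert lines 1 ("|" ++ pvStrMul " --- |" t0.length)
      let out := PySem.Str.join "\n" lines
      if rest = [] then out ++ "\n" else out  -- `out + "\n" if len(texts) == 1 else out`

-- ===== PRECONDITION & SPEC =====
-- Pre_ excludes exactly the dicts without a "text" key, where Python's table["text"] raises KeyError (in A and in B alike).
def Pre_transform_table_markdown (table : List (String × List (List String))) : Prop :=
  table.any (fun p => p.1 == "text") = true
instance (table : List (String × List (List String))) : Decidable (Pre_transform_table_markdown table) := by unfold Pre_transform_table_markdown; infer_instance

def pvWitness_transform_table_markdown : (List (String × List (List String))) :=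
  [("text", [["a", ""], ["b\nc", "d"]])]

def Spec_transform_table_markdown (table : List (String × List (List String))) (out : String) : Prop := out = transform_table_markdown_alt table
instance (table : List (String × List (List String))) (out : String) : Decidable (Spec_transform_table_markdown table out) := by unfold Spec_transform_table_markdown; infer_instance

-- ===== CLAIM (what is proved, stated in full; the proofs are below) =====
def Claim_equal_transform_table_markdown : Prop := ∀ (table : List (String × List (List String))), Dom_transform_table_markdown table → Pre_transform_table_markdown table → Spec_transform_table_markdown table (transform_table_markdown table)

-- ===== LEMMAS AND PROOFS =====

-- replace.go leaves the string unchanged when the pattern does not occur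
lemma pv_replace_go_of_not_infix (old new : List Char) :
    ∀ (fuel : Nat) (l acc : List Char), ¬ old <:+: l →
      PySem.Chars.replace.go old new fuel l acc = acc.reverse ++ l := by
  intro fuel
  induction fuel with
  | zero => intro l acc _; rw [PySem.Chars.replace.go]
  | succ n ih =>
    intro l acc h
    cases l with
    | nil => rw [PySem.Chars.replace.go] <;> simp
    | cons c t =>
      have hpre : old.isPrefixOf (c :: t) = false := by
        by_contra hb
        simp only [Bool.not_eq_false, List.isPrefixOf_iff_prefix] at hb
        exact h hb.isInfix
      rw [PySem.Chars.replace.go]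
      simp only [hpre, Bool.false_eq_true, if_false]
      rw [ih t (c :: acc) (fun hinf => h (hinf.trans (List.suffix_cons c t).isInfix))]
      simp

lemma pv_replace_eq_self (col : String) (h : PySem.Str.isIn "\n" col = false) :
    PySem.Str.replace col "\n" "<br>" = col := by
  rw [← String.toList_inj, PySem.Str.toList_replace]
  have hinf : ¬ ("\n".toList <:+: col.toList) := by
    rw [← PySem.Chars.isIn_eq_false_iff, ← PySem.Str.isIn_eq]; exact h
  simp only [PySem.Chars.replace]
  rw [if_neg (by decide)]
  rw [pv_replace_go_of_not_infix _ _ _ _ _ hinf]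
  simp

-- A's conditional replace equals B's unconditional one
lemma pv_repl_cond (c : String) :
    (if PySem.Str.isIn "\n" c then PySem.Str.replace c "\n" "<br>" else c)
      = PySem.Str.replace c "\n" "<br>" := by
  cases hin : PySem.Str.isIn "\n" c
  · simp [pv_replace_eq_self c hin]
  · simp

lemma pv_join0_nil : PySem.Str.join "" [] = "" := by
  rw [← String.toList_inj]; simp [PySem.Str.join, PySem.Chars.join_nil]

lemma pv_join0_cons (p : String) (rest : List String) :
    PySem.Str.join "" (p :: rest) = p ++ PySem.Str.join "" rest := by
  rw [← String.toList_inj]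
  cases rest with
  | nil => simp [PySem.Str.join, PySem.Chars.join_singleton, PySem.Chars.join_nil]
  | cons q r => simp [PySem.Str.join, PySem.Chars.join_cons_cons]

lemma pv_joinN_nil : PySem.Str.join "\n" [] = "" := by
  rw [← String.toList_inj]; simp [PySem.Str.join, PySem.Chars.join_nil]

lemma pv_joinN_cons_cons (p q : String) (rest : List String) :
    PySem.Str.join "\n" (p :: q :: rest) = p ++ "\n" ++ PySem.Str.join "\n" (q :: rest) := by
  rw [← String.toList_inj]
  simp [PySem.Str.join, PySem.Chars.join_cons_cons]

lemma pv_joinN_singleton (p : String) : PySem.Str.join "\n" [p] = p := by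
  rw [← String.toList_inj]; simp [PySem.Str.join, PySem.Chars.join_singleton]

-- dropping the last three characters of `X ++ " | "` gives back X
lemma pv_trim3 (X : String) : PySem.Str.slice (X ++ " | ") none (some (-3)) = X := by
  rw [← String.toList_inj]
  simp only [PySem.Str.slice, String.toList_ofList, String.toList_append, PySem.Chars.slice]
  rw [PySem.List.slice_to_neg_ofNat _ 3 (by omega)]
  rw [show (" | ".toList) = [' ', '|', ' '] from rfl]
  simp

lemma pv_pyGet_neg_one {α : Type} (l : List α) (h : l ≠ []) :
    PySem.List.pyGet? l (-1) = some (l.getLast h) := by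
  have hn : 0 < l.length := List.length_pos_of_ne_nil h
  simp only [PySem.List.pyGet?, PySem.List.pyIdx?]
  rw [if_neg (by omega), if_pos (by omega)]
  simp only [Option.bind_some, Int.neg_neg, Int.toNat_one]
  rw [List.getElem?_eq_getElem (by omega)]
  congr 1
  exact (List.getLast_eq_getElem h).symm

lemma pv_pyGet_zero_cons {α : Type} (x : α) (t : List α) :
    PySem.List.pyGet? (x :: t) 0 = some x := by
  simp [PySem.List.pyGet?, PySem.List.pyIdx?]

-- the tail of a row (cells at index ≥ 1), as A produces it
def pvTail : List String → String
  | [] => ""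
  | x :: t =>
    match t with
    | [] => if x = "" then "|" else PySem.Str.replace x "\n" "<br>"
    | _ :: _ => pvFragB x ++ pvTail t

-- A's cell step for a middle cell (1 ≤ j < rowLen - 1) is B's fragment
lemma pv_stepA_mid (rowLen : Int) (acc : String) (j : Int) (c : String)
    (h1 : 1 ≤ j) (h2 : j < rowLen - 1) :
    pvStepCellA rowLen acc (j, c) = acc ++ pvFragB c := by
  unfold pvStepCellA pvFragB
  by_cases hc : c = ""
  · simp only [hc]
    rw [if_neg (by simp), if_neg (by omega)]
    simp
  · simp only [ne_eq, hc, not_false_eq_true, if_true, pv_repl_cond]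
    rw [if_pos h2]
    simp [String.append_assoc]

-- A's cell step for the last cell (1 ≤ j = rowLen - 1)
lemma pv_stepA_last (rowLen : Int) (acc : String) (j : Int) (c : String)
    (h1 : 1 ≤ j) (h2 : j = rowLen - 1) :
    pvStepCellA rowLen acc (j, c)
      = acc ++ (if c = "" then "|" else PySem.Str.replace c "\n" "<br>") := by
  unfold pvStepCellA
  by_cases hc : c = ""
  · simp only [hc]
    rw [if_neg (by simp), if_neg (by omega)]
    simp
  · simp only [ne_eq, hc, not_false_eq_true, if_true, pv_repl_cond]
    rw [if_neg (by omega)]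
    simp

-- A's inner loop from index 1 on produces pvTail
lemma pv_foldA_tail (rowLen : Int) :
    ∀ (l : List String) (s : Int) (acc : String), 1 ≤ s → s + l.length = rowLen →
      (PySem.List.enumerate l s).foldl (pvStepCellA rowLen) acc = acc ++ pvTail l := by
  intro l
  induction l with
  | nil => intro s acc _ _; simp [PySem.List.enumerate_nil, pvTail]
  | cons x t ih =>
    intro s acc hs hlen
    rw [PySem.List.enumerate_cons, List.foldl_cons]
    cases t with
    | nil =>
      simp only [List.length_cons, List.length_nil] at hlen
      rw [pv_stepA_last rowLen acc s x hs (by push_cast at hlen ⊢; omega)]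
      simp [PySem.List.enumerate_nil, pvTail]
    | cons y u =>
      have hmid : s < rowLen - 1 := by
        simp only [List.length_cons] at hlen; push_cast at hlen; omega
      rw [pv_stepA_mid rowLen acc s x hs hmid]
      rw [ih (s + 1) _ (by omega)
        (by simp only [List.length_cons] at hlen ⊢; push_cast at hlen ⊢; omega)]
      simp [pvTail, String.append_assoc]

-- the joined fragments of a non-empty list are pvTail, with " | " appended iff the last cell is non-empty
lemma pv_tail_join : ∀ (l : List String) (h : l ≠ []),
    PySem.Str.join "" (l.map pvFragB)
      = if l.getLast h = "" then pvTail l else pvTail l ++ " | " := by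
  intro l
  induction l with
  | nil => intro h; exact absurd rfl h
  | cons x t ih =>
    intro _
    cases t with
    | nil =>
      simp only [List.map_cons, List.map_nil, pv_join0_cons, pv_join0_nil, List.getLast_singleton]
      unfold pvTail pvFragB
      by_cases hx : x = "" <;> simp [hx]
    | cons y u =>
      rw [List.getLast_cons (by simp : (y :: u) ≠ [])]
      rw [List.map_cons, pv_join0_cons, ih (by simp)]
      rw [show pvTail (x :: y :: u) = pvFragB x ++ pvTail (y :: u) from rfl]
      by_cases hl : (y :: u).getLast (by simp) = "" <;> simp [hl, String.append_assoc]

-- pvRowB on a non-empty row, with the two edge tests evaluated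
lemma pv_rowB_cons (c0 : String) (rest : List String) :
    pvRowB (c0 :: rest)
      = (let line := PySem.Str.join "" ((c0 :: rest).map pvFragB);
         let line := if c0 = "" then "|" ++ line else line;
         if (c0 :: rest).getLast (by simp) ≠ "" then PySem.Str.slice line none (some (-3))
         else line) := by
  unfold pvRowB
  rw [pv_pyGet_zero_cons, pv_pyGet_neg_one (c0 :: rest) (by simp)]

-- pvRowB on a one-cell row
lemma pv_rowB_single (c0 : String) :
    pvRowB [c0] = if c0 = "" then "||" else PySem.Str.replace c0 "\n" "<br>" := by
  rw [pv_rowB_cons]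
  simp only [List.map_cons, List.map_nil, pv_join0_cons, pv_join0_nil, List.getLast_singleton]
  by_cases hc : c0 = ""
  · simp [hc, pvFragB]
  · rw [if_pos (show c0 ≠ "" from hc), if_neg hc, if_neg hc,
      show pvFragB c0 = PySem.Str.replace c0 "\n" "<br>" ++ " | " from by simp [pvFragB, hc],
      show (PySem.Str.replace c0 "\n" "<br>" ++ " | ") ++ "" = PySem.Str.replace c0 "\n" "<br>" ++ " | " from by simp,
      pv_trim3]

-- pvRowB on a row with at least two cells: head fragment ++ pvTail of the rest
lemma pv_rowB_multi (c0 y : String) (u : List String) :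
    pvRowB (c0 :: y :: u)
      = (if c0 = "" then "||" else PySem.Str.replace c0 "\n" "<br>" ++ " | ") ++ pvTail (y :: u) := by
  rw [pv_rowB_cons]
  rw [List.getLast_cons (by simp : (y :: u) ≠ [])]
  rw [List.map_cons, pv_join0_cons, pv_tail_join (y :: u) (by simp)]
  by_cases hl : (y :: u).getLast (by simp) = ""
  · rw [if_pos hl, if_neg (show ¬((y :: u).getLast (by simp) ≠ "") from by simp [hl])]
    by_cases hc : c0 = ""
    · rw [if_pos hc, if_pos hc,
        show pvFragB c0 = "|" from by simp [pvFragB, hc],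
        show ("||" : String) = "|" ++ "|" from rfl, String.append_assoc]
    · rw [if_neg hc, if_neg hc,
        show pvFragB c0 = PySem.Str.replace c0 "\n" "<br>" ++ " | " from by simp [pvFragB, hc],
        String.append_assoc]
  · rw [if_neg hl, if_pos (show (y :: u).getLast (by simp) ≠ "" from hl)]
    by_cases hc : c0 = ""
    · rw [if_pos hc, if_pos hc,
        show pvFragB c0 = "|" from by simp [pvFragB, hc],
        show ("|" ++ ("|" ++ (pvTail (y :: u) ++ " | ")))
          = ("|" ++ ("|" ++ pvTail (y :: u))) ++ " | " from by simp [String.append_assoc],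
        pv_trim3, show ("||" : String) = "|" ++ "|" from rfl, String.append_assoc]
    · rw [if_neg hc, if_neg hc,
        show pvFragB c0 = PySem.Str.replace c0 "\n" "<br>" ++ " | " from by simp [pvFragB, hc],
        show ((PySem.Str.replace c0 "\n" "<br>" ++ " | ") ++ (pvTail (y :: u) ++ " | "))
          = ((PySem.Str.replace c0 "\n" "<br>" ++ " | ") ++ pvTail (y :: u)) ++ " | " from by
            simp [String.append_assoc],
        pv_trim3, String.append_assoc]

-- A's inner loop over a whole row appends exactly B's formatted row
lemma pv_rowB_eq (row : List String) (acc : String) :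
    (PySem.List.enumerate row).foldl (pvStepCellA (row.length : Int)) acc = acc ++ pvRowB row := by
  cases row with
  | nil => simp [PySem.List.enumerate_nil, pvRowB, PySem.List.pyGet?, PySem.List.pyIdx?, pv_join0_nil]
  | cons c0 rest =>
    rw [PySem.List.enumerate_cons, List.foldl_cons]
    cases rest with
    | nil =>
      rw [PySem.List.enumerate_nil, List.foldl_nil, pv_rowB_single]
      unfold pvStepCellA
      by_cases hc : c0 = ""
      · simp only [hc]
        rw [if_neg (by simp)]
        simp
      · simp only [ne_eq, hc, not_false_eq_true, if_true, pv_repl_cond]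
        rw [if_neg (by norm_num)]
        simp
    | cons y u =>
      have hstep0 : pvStepCellA ((c0 :: y :: u).length : Int) acc (0, c0)
          = acc ++ (if c0 = "" then "||" else PySem.Str.replace c0 "\n" "<br>" ++ " | ") := by
        unfold pvStepCellA
        by_cases hc : c0 = ""
        · simp only [hc]
          rw [if_neg (by simp)]
          simp
        · simp only [ne_eq, hc, not_false_eq_true, if_true, pv_repl_cond]
          rw [if_pos (by simp only [List.length_cons]; push_cast; omega)]
          simp [String.append_assoc]
      rw [hstep0, show ((0 : Int) + 1) = 1 from rfl]
      rw [pv_foldA_tail ((c0 :: y :: u).length : Int) (y :: u) 1 _ (by omega)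
        (by simp only [List.length_cons]; push_cast; omega)]
      rw [pv_rowB_multi]
      simp [String.append_assoc]

-- A's outer loop from index 1 on = "\n".join of B's formatted rows
lemma pv_foldA_rows (N : Nat) :
    ∀ (l : List (List String)) (s : Int) (acc : String),
      1 ≤ s → s + l.length = (N : Int) →
      (PySem.List.enumerate l s).foldl (pvStepRowA N) acc
        = acc ++ PySem.Str.join "\n" (l.map pvRowB) := by
  intro l
  induction l with
  | nil => intro s acc _ _; simp [PySem.List.enumerate_nil, pv_joinN_nil]
  | cons r t ih =>
    intro s acc hs hN
    rw [PySem.List.enumerate_cons]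
    simp only [List.foldl_cons, List.map_cons]
    have hstep : pvStepRowA N acc (s, r)
        = (if s < (N : Int) - 1 then acc ++ pvRowB r ++ "\n" else acc ++ pvRowB r) := by
      unfold pvStepRowA
      simp only [pv_rowB_eq]
      rw [if_neg (by omega)]
    cases t with
    | nil =>
      have hnot : ¬ (s < (N : Int) - 1) := by
        simp only [List.length_cons, List.length_nil] at hN; push_cast at hN; omega
      rw [hstep, if_neg hnot, PySem.List.enumerate_nil, List.foldl_nil]
      simp only [List.map_nil]
      rw [pv_joinN_singleton]
    | cons q u =>
      have hlt : s < (N : Int) - 1 := by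
        simp only [List.length_cons] at hN; push_cast at hN; omega
      rw [hstep, if_pos hlt]
      rw [ih (s + 1) _ (by omega) (by simp only [List.length_cons] at hN ⊢; push_cast at hN ⊢; omega)]
      simp only [List.map_cons]
      rw [pv_joinN_cons_cons]
      simp [String.append_assoc]

-- ===== VERDICT (by name: the statement is the Claim_ definition above) =====
theorem transform_table_markdown_spec : Claim_equal_transform_table_markdown := by
  intro table _dom pre
  unfold Spec_transform_table_markdown transform_table_markdown transform_table_markdown_alt
  cases hfind : table.find? (fun p => p.1 == "text") with
  | none =>
    exfalso
    rw [List.find?_eq_none] at hfind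
    rcases List.any_eq_true.mp pre with ⟨x, hx, hpx⟩
    exact hfind x hx hpx
  | some p =>
    cases htexts : p.2 with
    | nil => simp [htexts, PySem.List.enumerate_nil]
    | cons t0 rest =>
      simp only [htexts]
      rw [PySem.List.enumerate_cons, List.foldl_cons]
      have hstep0 : pvStepRowA (t0 :: rest).length "" ((0 : Int), t0)
          = pvRowB t0 ++ ("\n" ++ ("|" ++ pvStrMul " --- |" t0.length) ++ "\n") := by
        unfold pvStepRowA
        simp only [pv_rowB_eq]
        rw [if_pos trivial, show ("" : String) ++ pvRowB t0 = pvRowB t0 from by simp]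
        simp only [String.append_assoc]
      rw [hstep0, show ((0 : Int) + 1) = 1 from rfl]
      rw [List.map_cons, show (PySem.List.insert (pvRowB t0 :: rest.map pvRowB) 1
            ("|" ++ pvStrMul " --- |" t0.length))
          = pvRowB t0 :: ("|" ++ pvStrMul " --- |" t0.length) :: rest.map pvRowB by
        rw [PySem.List.insert_ofNat _ 1 _ (by simp)]; simp]
      cases rest with
      | nil =>
        simp only [PySem.List.enumerate_nil, List.foldl_nil, List.map_nil]
        rw [pv_joinN_cons_cons, pv_joinN_singleton]
        simp [String.append_assoc]
      | cons q u =>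
        rw [pv_foldA_rows (t0 :: q :: u).length (q :: u) 1 _ (by omega)
          (by simp only [List.length_cons]; push_cast; omega)]
        rw [if_neg (by simp)]
        rw [pv_joinN_cons_cons, List.map_cons, pv_joinN_cons_cons]
        simp [String.append_assoc]
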